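-- pv_equiv track=rewrite | github.com/xiasma/evagene-integration-examples | couple-carrier-risk/python/src/couple_carrier_risk/couple_risk_calculator.py | _union_preserving_order
-- ===== SOURCE A (Python) =====
-- from typing import Any
--
-- def _union_preserving_order(
--     first: dict[str, dict[str, Any]],
--     second: dict[str, dict[str, Any]],
-- ) -> tuple[str, ...]:
--     seen = list(first.keys())
--     for name in second:
--         if name not in first:
--             seen.append(name)
--     return tuple(seen)
-- ===== SOURCE B (Python) =====
-- def _union_preserving_order(first, second):
--     combined = (*first, *second)
--     pos = {}
--     for i, name in enumerate(combined):
--         pos.setdefault(name, i)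
--     return tuple(sorted(pos, key=pos.get))
-- ===== Notes on version B (the rewrite author's own statement) =====
-- stated objective: alternative
-- what changed: B uses an index-then-sort algorithm: it records each key's first-occurrence index over the concatenated key stream (dict.setdefault) and produces the union by sorting the keys on that index, instead of A's single pass appending unseen keys under a membership guard.
import Mathlib
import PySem

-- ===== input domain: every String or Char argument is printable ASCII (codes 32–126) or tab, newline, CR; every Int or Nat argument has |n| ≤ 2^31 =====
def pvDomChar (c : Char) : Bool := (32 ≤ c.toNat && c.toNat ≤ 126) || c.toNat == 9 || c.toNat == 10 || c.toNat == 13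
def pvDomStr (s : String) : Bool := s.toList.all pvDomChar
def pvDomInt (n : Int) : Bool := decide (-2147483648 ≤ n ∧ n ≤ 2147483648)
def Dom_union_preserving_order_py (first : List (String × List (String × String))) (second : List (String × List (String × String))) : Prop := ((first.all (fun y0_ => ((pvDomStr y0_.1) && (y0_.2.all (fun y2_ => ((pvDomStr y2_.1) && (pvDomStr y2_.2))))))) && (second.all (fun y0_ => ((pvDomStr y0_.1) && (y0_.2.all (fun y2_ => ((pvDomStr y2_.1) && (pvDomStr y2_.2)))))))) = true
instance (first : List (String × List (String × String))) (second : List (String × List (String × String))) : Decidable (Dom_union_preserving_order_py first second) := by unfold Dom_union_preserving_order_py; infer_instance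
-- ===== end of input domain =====

-- B replaces A's guarded append loop by a different algorithm: record each key's first
-- occurrence index in the concatenated key stream, then sort the keys by that index
-- (objective: alternative; the RETURN value is what is proved equal).

-- ===== PORT A =====
def union_preserving_order_py (first : List (String × List (String × String))) (second : List (String × List (String × String))) : List String :=
  -- seen = list(first.keys()); for name in second: if name not in first: seen.append(name)
  (second.map Prod.fst).foldl
    (fun seen name => if name ∈ first.map Prod.fst then seen else seen ++ [name])
    (first.map Prod.fst)

-- ===== PORT B =====
-- combined = (*first, *second); pos = {}; for i, name in enumerate(combined): pos.setdefault(name, i)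
-- return tuple(sorted(pos, key=pos.get))
-- (pos.get: every sorted key is a key of pos, whose values are ints, so ported as getD _ 0 — exact here)
def union_preserving_order_py_alt (first : List (String × List (String × String))) (second : List (String × List (String × String))) : List String :=
  let combined := first.map Prod.fst ++ second.map Prod.fst
  let pos := (PySem.List.enumerate combined 0).foldl
    (fun d p => d.setdefault p.2 p.1) (PySem.Dict.empty : PySem.Dict String Int)
  PySem.List.sorted pos.keys (fun k => pos.getD k 0) false

-- ===== PRECONDITION & SPEC =====
-- Pre_ states the dict representation invariant: each argument encodes a Python dict,
-- whose keys are necessarily distinct; it excludes no input the Python A can receive.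
def Pre_union_preserving_order_py (first : List (String × List (String × String))) (second : List (String × List (String × String))) : Prop :=
  (first.map Prod.fst).Nodup ∧ (second.map Prod.fst).Nodup
instance (first : List (String × List (String × String))) (second : List (String × List (String × String))) : Decidable (Pre_union_preserving_order_py first second) := by unfold Pre_union_preserving_order_py; infer_instance

def pvWitness_union_preserving_order_py : (List (String × List (String × String))) × (List (String × List (String × String))) :=
  ([("a", [("x", "1")]), ("b", [])], [("b", []), ("c", [("y", "2")])])

def Spec_union_preserving_order_py (first : List (String × List (String × String))) (second : List (String × List (String × String))) (out : List String) : Prop := out = union_preserving_order_py_alt first second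
instance (first : List (String × List (String × String))) (second : List (String × List (String × String))) (out : List String) : Decidable (Spec_union_preserving_order_py first second out) := by unfold Spec_union_preserving_order_py; infer_instance

-- ===== CLAIM (what is proved, stated in full; the proofs are below) =====
def Claim_equal_union_preserving_order_py : Prop := ∀ (first : List (String × List (String × String))) (second : List (String × List (String × String))), Dom_union_preserving_order_py first second → Pre_union_preserving_order_py first second → Spec_union_preserving_order_py first second (union_preserving_order_py first second)

-- ===== LEMMAS AND PROOFS =====

-- A's guarded append loop over s extends the accumulator by s's elements not in f.
theorem foldl_guard_eq_append_filter (f acc s : List String) :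
    s.foldl (fun seen name => if name ∈ f then seen else seen ++ [name]) acc
      = acc ++ s.filter (fun y => !(decide (y ∈ f))) := by
  induction s generalizing acc with
  | nil => simp
  | cons x xs ih =>
      by_cases hx : x ∈ f
      · simp [hx, ih acc]
      · simp [hx, ih (acc ++ [x])]

-- keys of B's setdefault loop: the ordered dedup of the names it sees, appended to d.keys.
theorem keys_foldl_setdefault (ps : List (Int × String)) (d : PySem.Dict String Int) :
    ((ps.foldl (fun d p => d.setdefault p.2 p.1) d)).keys
      = PySem.Set.update d.keys (ps.map (·.2)) := by
  induction ps generalizing d with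
  | nil => simp
  | cons p ps ih =>
      rw [List.foldl_cons]
      by_cases hc : d.contains p.2 = true
      · have hadd : PySem.Set.add d.keys p.2 = d.keys := by
          simp [PySem.Set.add, PySem.Set.contains,
            (PySem.Dict.contains_iff_mem_keys _ _).mp hc]
        rw [PySem.Dict.setdefault_of_contains _ _ hc, ih, List.map_cons,
            PySem.Set.update, PySem.Set.update, List.foldl_cons, hadd]
      · have hnot : p.2 ∉ d.keys := fun h => hc ((PySem.Dict.contains_iff_mem_keys _ _).mpr h)
        have hadd : PySem.Set.add d.keys p.2 = d.keys ++ [p.2] := by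
          simp [PySem.Set.add, PySem.Set.contains, hnot]
        rw [PySem.Dict.setdefault_of_not_contains _ _ (by simpa using hc), ih,
            PySem.Dict.keys_insert_of_not_contains _ _ (by simpa using hc),
            List.map_cons, PySem.Set.update, PySem.Set.update, List.foldl_cons, hadd]

-- Main invariant: if d's keys are listed in nondecreasing value order and every value in d
-- is below every index still to come, and the indices arrive in nondecreasing order, then
-- after B's setdefault loop the keys are still listed in nondecreasing value order.
theorem pairwise_getD_foldl_setdefault (ps : List (Int × String)) (d : PySem.Dict String Int)
    (hd : d.keys.Pairwise (fun a b => d.getD a 0 ≤ d.getD b 0))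
    (hmono : ∀ k ∈ d.keys, ∀ p ∈ ps, d.getD k 0 ≤ p.1)
    (hps : ps.Pairwise (fun p q => p.1 ≤ q.1)) :
    ((ps.foldl (fun d p => d.setdefault p.2 p.1) d)).keys.Pairwise
      (fun a b => ((ps.foldl (fun d p => d.setdefault p.2 p.1) d)).getD a 0
                ≤ ((ps.foldl (fun d p => d.setdefault p.2 p.1) d)).getD b 0) := by
  induction ps generalizing d with
  | nil => exact hd
  | cons p ps ih =>
      rw [List.foldl_cons]
      by_cases hc : d.contains p.2 = true
      · rw [PySem.Dict.setdefault_of_contains _ _ hc]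
        exact ih d hd (fun k hk q hq => hmono k hk q (List.mem_cons_of_mem _ hq))
          hps.tail
      · rw [PySem.Dict.setdefault_of_not_contains _ _ (by simpa using hc)]
        have hnot : p.2 ∉ d.keys := by
          intro h; exact absurd ((PySem.Dict.contains_iff_mem_keys _ _).mpr h) hc
        have hkeys : (d.insert p.2 p.1).keys = d.keys ++ [p.2] :=
          PySem.Dict.keys_insert_of_not_contains _ _ (by simpa using hc)
        have hgd : ∀ k ∈ d.keys, (d.insert p.2 p.1).getD k 0 = d.getD k 0 := by
          intro k hk
          exact PySem.Dict.getD_insert_of_ne _ _ _ (by rintro rfl; exact hnot hk)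
        refine ih (d.insert p.2 p.1) ?_ ?_ hps.tail
        · rw [hkeys]
          refine List.pairwise_append.mpr ⟨?_, by simp, ?_⟩
          · exact hd.imp_of_mem (fun {a b} ha hb h => by rw [hgd a ha, hgd b hb]; exact h)
          · intro a ha b hb
            simp only [List.mem_singleton] at hb; subst hb
            rw [hgd a ha, PySem.Dict.getD_insert_self]
            exact hmono a ha p (List.mem_cons_self)
        · intro k hk q hq
          rw [hkeys] at hk
          rcases List.mem_append.mp hk with hk | hk
          · rw [hgd k hk]; exact hmono k hk q (List.mem_cons_of_mem _ hq)
          · simp only [List.mem_singleton] at hk; subst hk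
            rw [PySem.Dict.getD_insert_self]
            exact (List.pairwise_cons.mp hps).1 q hq

-- ===== VERDICT (by name: the statement is the Claim_ definition above) =====
theorem union_preserving_order_py_spec : Claim_equal_union_preserving_order_py := by
  intro first second _ hpre
  obtain ⟨hf, hs⟩ := hpre
  unfold Spec_union_preserving_order_py union_preserving_order_py union_preserving_order_py_alt
  set L := first.map Prod.fst ++ second.map Prod.fst with hL
  set pos := (PySem.List.enumerate L 0).foldl
    (fun d p => d.setdefault p.2 p.1) (PySem.Dict.empty : PySem.Dict String Int) with hpos
  have hkeys : pos.keys = PySem.Set.ofList L := by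
    rw [hpos, keys_foldl_setdefault, PySem.List.map_snd_enumerate]
    simp [PySem.Set.update_nil_left]
  have hpair : pos.keys.Pairwise (fun a b => pos.getD a 0 ≤ pos.getD b 0) := by
    rw [hpos]
    refine pairwise_getD_foldl_setdefault _ _ (by simp) (by simp) ?_
    exact (PySem.List.pairwise_lt_enumerate L 0).imp (fun h => le_of_lt h)
  rw [PySem.List.sorted_eq_self_of_pairwise _ _ hpair, hkeys]
  rw [foldl_guard_eq_append_filter, hL, PySem.Set.ofList_append,
      PySem.Set.ofList_eq_self_of_nodup _ hf,
      PySem.Set.update_eq_append_filter,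
      PySem.Set.ofList_eq_self_of_nodup _ hs]
  simp [PySem.Set.contains]
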